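-- pv_equiv track=rewrite | github.com/Wewoll/TIC | utils.py | decodificarMensaje
-- ===== SOURCE A (Python) =====
-- def decodificarMensaje(alfabeto_fuente, codigos, cadena_codificada):
--     mapa_decodificacion = dict(zip(codigos, alfabeto_fuente))
--
--     mensaje_decodificado = []
--     buffer_actual = ""
--
--     for caracter in cadena_codificada:
--         buffer_actual += caracter
--
--         if buffer_actual in mapa_decodificacion:
--             simbolo = mapa_decodificacion[buffer_actual]
--             mensaje_decodificado.append(simbolo)
--             buffer_actual = ""
--
--     if buffer_actual:
--         return f"ERROR: No se pudo decodificar. Sobrante en el buffer: '{buffer_actual}'"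
--
--     # return " ".join(mensaje_decodificado) si quiero todo separado
--     return "".join(mensaje_decodificado)
-- ===== SOURCE B (Python) =====
-- def decodificarMensaje(alfabeto_fuente, codigos, cadena_codificada):
--     mapa_decodificacion = dict(zip(codigos, alfabeto_fuente))
--     # a matched chunk is always a key of the map, so never longer than the longest code:
--     # at each position try only prefix lengths 1..max_len instead of growing a buffer forever
--     max_len = max(map(len, codigos), default=0)
--
--     mensaje_decodificado = []
--     i = 0
--     n = len(cadena_codificada)
--     while i < n:
--         for L in range(1, min(max_len, n - i) + 1):
--             trozo = cadena_codificada[i:i + L]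
--             if trozo in mapa_decodificacion:
--                 mensaje_decodificado.append(mapa_decodificacion[trozo])
--                 i += L
--                 break
--         else:
--             return f"ERROR: No se pudo decodificar. Sobrante en el buffer: '{cadena_codificada[i:]}'"
--
--     return "".join(mensaje_decodificado)
-- ===== Notes on version B (the rewrite author's own statement) =====
-- stated objective: alternative
-- what changed: Instead of growing a buffer character-by-character and testing the whole buffer against the dict after every character, B advances through the string trying only candidate prefix lengths 1..max(code length) at each position (a match is always a dict key, so never longer than the longest code), slicing off the matched chunk.
import Mathlib
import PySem

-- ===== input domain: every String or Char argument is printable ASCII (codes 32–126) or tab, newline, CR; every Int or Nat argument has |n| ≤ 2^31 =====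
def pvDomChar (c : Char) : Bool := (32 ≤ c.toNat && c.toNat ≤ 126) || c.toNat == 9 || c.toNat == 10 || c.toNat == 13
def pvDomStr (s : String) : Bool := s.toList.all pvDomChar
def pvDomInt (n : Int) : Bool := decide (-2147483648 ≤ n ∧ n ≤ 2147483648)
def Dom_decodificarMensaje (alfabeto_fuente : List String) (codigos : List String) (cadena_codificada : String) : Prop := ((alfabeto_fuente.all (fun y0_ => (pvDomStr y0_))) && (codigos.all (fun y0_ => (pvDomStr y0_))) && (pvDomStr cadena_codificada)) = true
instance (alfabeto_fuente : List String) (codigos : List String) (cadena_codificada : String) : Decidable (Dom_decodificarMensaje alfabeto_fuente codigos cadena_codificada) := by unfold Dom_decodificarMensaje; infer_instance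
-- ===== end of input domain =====

-- B replaces A's ever-growing buffer (re-checked against the dict after every character) by
-- trying only prefix lengths 1..max(code length) at the current position: a matched chunk is
-- always a dictionary key, so never longer than the longest code. Objective: alternative.

-- the f-string error message (both Pythons contain this exact literal)
def pvErr (resto : List Char) : String :=
  "ERROR: No se pudo decodificar. Sobrante en el buffer: '" ++ String.ofList resto ++ "'"

-- ===== PORT A =====
-- loop body of A: buffer_actual += caracter; if buffer in mapa: emit symbol, reset buffer
def pvStepA (m : PySem.Dict String String) (st : List String × List Char) (c : Char) :
    List String × List Char :=
  let buf := st.2 ++ [c]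
  match m.get? (String.ofList buf) with
  | some simbolo => (st.1 ++ [simbolo], [])
  | none => (st.1, buf)

def decodificarMensaje (alfabeto_fuente : List String) (codigos : List String) (cadena_codificada : String) : String :=
  let mapa := PySem.Dict.ofList (codigos.zip alfabeto_fuente)
  let r := cadena_codificada.toList.foldl (pvStepA mapa) ([], [])
  if r.2 ≠ [] then pvErr r.2 else PySem.Str.join "" r.1

-- ===== PORT B =====
-- pvFindL is B's inner "for L in range(1, ...): if resto[:L] in mapa: ... break / else"; the
-- membership-test theorem below it is cited by pvLoopB's decreasing_by (termination of the while loop)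
def pvFindL (m : PySem.Dict String String) (resto : List Char) : List Nat → Option (Nat × String)
  | [] => none
  | L :: Ls =>
    match m.get? (String.ofList (resto.take L)) with
    | some simbolo => some (L, simbolo)
    | none => pvFindL m resto Ls

theorem pvFindL_mem_of_some {m : PySem.Dict String String} {resto : List Char} {ls : List Nat}
    {L : Nat} {sym : String} (h : pvFindL m resto ls = some (L, sym)) : L ∈ ls := by
  induction ls with
  | nil => simp [pvFindL] at h
  | cons x xs ih =>
    simp only [pvFindL] at h
    cases hx : m.get? (String.ofList (resto.take x)) with
    | some s => rw [hx] at h; simp at h; simp [h.1]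
    | none => rw [hx] at h; exact List.mem_cons_of_mem _ (ih h)

def pvLoopB (m : PySem.Dict String String) (maxLen : Nat) (out : List String)
    (resto : List Char) : String :=
  if _h : resto = [] then PySem.Str.join "" out
  else
    match hf : pvFindL m resto (List.range' 1 (min maxLen resto.length)) with
    | some (L, simbolo) => pvLoopB m maxLen (out ++ [simbolo]) (resto.drop L)
    | none => pvErr resto
termination_by resto.length
decreasing_by
  have hL := List.mem_range'_1.mp (pvFindL_mem_of_some hf)
  have hr : 0 < resto.length := List.length_pos_iff.mpr _h
  simp only [List.length_drop]; omega


def decodificarMensaje_alt (alfabeto_fuente : List String) (codigos : List String) (cadena_codificada : String) : String :=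
  let mapa := PySem.Dict.ofList (codigos.zip alfabeto_fuente)
  -- max_len = max(map(len, codigos), default=0)
  let maxLen := PySem.List.maxD (codigos.map (fun t => t.toList.length)) (fun x => x) 0
  pvLoopB mapa maxLen [] cadena_codificada.toList

-- ===== PRECONDITION & SPEC =====
def Spec_decodificarMensaje (alfabeto_fuente : List String) (codigos : List String) (cadena_codificada : String) (out : String) : Prop := out = decodificarMensaje_alt alfabeto_fuente codigos cadena_codificada
instance (alfabeto_fuente : List String) (codigos : List String) (cadena_codificada : String) (out : String) : Decidable (Spec_decodificarMensaje alfabeto_fuente codigos cadena_codificada out) := by unfold Spec_decodificarMensaje; infer_instance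

-- ===== CLAIM (what is proved, stated in full; the proofs are below) =====
def Claim_equal_decodificarMensaje : Prop := ∀ (alfabeto_fuente : List String) (codigos : List String) (cadena_codificada : String), Dom_decodificarMensaje alfabeto_fuente codigos cadena_codificada → Spec_decodificarMensaje alfabeto_fuente codigos cadena_codificada (decodificarMensaje alfabeto_fuente codigos cadena_codificada)

-- ===== LEMMAS AND PROOFS =====
theorem pvLoopB_nil (m : PySem.Dict String String) (maxLen : Nat) (out : List String) :
    pvLoopB m maxLen out [] = PySem.Str.join "" out := by
  rw [pvLoopB, dif_pos rfl]

theorem pvLoopB_cons (m : PySem.Dict String String) (maxLen : Nat) (out : List String)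
    (resto : List Char) (h : resto ≠ []) :
    pvLoopB m maxLen out resto =
      match pvFindL m resto (List.range' 1 (min maxLen resto.length)) with
      | some (L, simbolo) => pvLoopB m maxLen (out ++ [simbolo]) (resto.drop L)
      | none => pvErr resto := by
  conv_lhs => rw [pvLoopB]
  rw [dif_neg h]
  split <;> rename_i heq <;> rw [heq]

theorem pvFindL_some_spec (m : PySem.Dict String String) (r : List Char) :
    ∀ (n s L : Nat) (sym : String),
      pvFindL m r (List.range' s n) = some (L, sym) →
      s ≤ L ∧ L < s + n ∧ m.get? (String.ofList (r.take L)) = some sym ∧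
        ∀ k, s ≤ k → k < L → m.get? (String.ofList (r.take k)) = none := by
  intro n
  induction n with
  | zero => intro s L sym h; simp [pvFindL] at h
  | succ n ih =>
    intro s L sym h
    rw [List.range'_succ] at h
    simp only [pvFindL] at h
    cases hs : m.get? (String.ofList (r.take s)) with
    | some v =>
      rw [hs] at h; simp at h
      obtain ⟨rfl, rfl⟩ := h
      exact ⟨le_rfl, by omega, hs, fun k hk1 hk2 => by omega⟩
    | none =>
      rw [hs] at h
      obtain ⟨h1, h2, h3, h4⟩ := ih (s+1) L sym h
      refine ⟨by omega, by omega, h3, fun k hk1 hk2 => ?_⟩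
      rcases Nat.eq_or_lt_of_le hk1 with rfl | hlt
      · exact hs
      · exact h4 k hlt hk2

theorem pvFindL_none_spec (m : PySem.Dict String String) (r : List Char) :
    ∀ (n s : Nat), pvFindL m r (List.range' s n) = none →
      ∀ k, s ≤ k → k < s + n → m.get? (String.ofList (r.take k)) = none := by
  intro n
  induction n with
  | zero => intro s h k hk1 hk2; omega
  | succ n ih =>
    intro s h k hk1 hk2
    rw [List.range'_succ] at h
    simp only [pvFindL] at h
    cases hs : m.get? (String.ofList (r.take s)) with
    | some v => rw [hs] at h; simp at h
    | none =>
      rw [hs] at h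
      rcases Nat.eq_or_lt_of_le hk1 with rfl | hlt
      · exact hs
      · exact ih (s+1) h k hlt (by omega)

theorem pvConsume (m : PySem.Dict String String) :
    ∀ (L : Nat) (rem b : List Char) (out : List String), L ≤ rem.length →
      (∀ k, k < L → m.get? (String.ofList (b ++ rem.take (k + 1))) = none) →
      List.foldl (pvStepA m) (out, b) rem
        = List.foldl (pvStepA m) (out, b ++ rem.take L) (rem.drop L) := by
  intro L
  induction L with
  | zero => intro rem b out _ _; simp
  | succ L ih =>
    intro rem b out hle hnone
    cases rem with
    | nil => simp at hle
    | cons hd tl =>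
      have h0 := hnone 0 (by omega)
      simp only [List.take_succ_cons, List.take_zero] at h0
      have hstep : pvStepA m (out, b) hd = (out, b ++ [hd]) := by
        simp only [pvStepA]
        rw [show b ++ [hd] = b ++ [hd] ++ [] from by simp] at h0
        simp only [List.append_nil] at h0
        rw [h0]
      rw [List.foldl_cons, hstep]
      rw [ih tl (b ++ [hd]) out (by simpa using hle) ?later]
      · simp only [List.take_succ_cons, List.drop_succ_cons]
        congr 1
        simp
      case later =>
        intro k hk
        have := hnone (k+1) (by omega)
        simpa [List.take_succ_cons] using this

theorem pvMem_le_maxD (xs : List Nat) (y : Nat) (h : y ∈ xs) :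
    y ≤ PySem.List.maxD xs (fun x => x) 0 := by
  unfold PySem.List.maxD
  cases hm : PySem.List.max? xs (fun x => x) with
  | some mx =>
    simpa using PySem.List.max?_isMax hm y h
  | none =>
    rw [PySem.List.max?_eq_none_iff] at hm
    subst hm
    simp at h

theorem pvMainLoop (m : PySem.Dict String String) (maxLen : Nat)
    (Hlen : ∀ k v, m.get? k = some v → k.toList.length ≤ maxLen) :
    ∀ (rem : List Char) (out : List String),
      (if (List.foldl (pvStepA m) (out, []) rem).2 ≠ [] then
          pvErr (List.foldl (pvStepA m) (out, []) rem).2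
        else PySem.Str.join "" (List.foldl (pvStepA m) (out, []) rem).1)
        = pvLoopB m maxLen out rem := by
  suffices H : ∀ (n : Nat) (rem : List Char) (out : List String), rem.length ≤ n →
      (if (List.foldl (pvStepA m) (out, []) rem).2 ≠ [] then
          pvErr (List.foldl (pvStepA m) (out, []) rem).2
        else PySem.Str.join "" (List.foldl (pvStepA m) (out, []) rem).1)
        = pvLoopB m maxLen out rem by
    intro rem out; exact H rem.length rem out le_rfl
  intro n
  induction n with
  | zero =>
    intro rem out hlen
    have : rem = [] := by cases rem <;> simp_all
    subst this
    simp [pvLoopB_nil]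
  | succ n ih =>
    intro rem out hlen
    by_cases hre : rem = []
    · subst hre; simp [pvLoopB_nil]
    · rw [pvLoopB_cons m maxLen out rem hre]
      cases hf : pvFindL m rem (List.range' 1 (min maxLen rem.length)) with
      | none =>
        have hmiss := pvFindL_none_spec m rem _ _ hf
        have hall : ∀ k, k < rem.length →
            m.get? (String.ofList ([] ++ rem.take (k + 1))) = none := by
          intro k hk
          simp only [List.nil_append]
          by_cases hsm : k + 1 ≤ min maxLen rem.length
          · exact hmiss (k+1) (by omega) (by omega)
          · cases hg : m.get? (String.ofList (rem.take (k+1))) with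
            | none => rfl
            | some v =>
              exfalso
              have hlb := Hlen _ _ hg
              simp [List.length_take] at hlb
              omega
        have hc := pvConsume m rem.length rem [] out le_rfl hall
        rw [List.take_length, List.drop_length] at hc
        rw [hc]
        simp [hre]
      | some Ls =>
        obtain ⟨L, sym⟩ := Ls
        obtain ⟨h1, h2, hhit, hmb⟩ := pvFindL_some_spec m rem _ _ _ _ hf
        have hLle : L ≤ rem.length := by omega
        have hLpos : 0 < rem.length := List.length_pos_iff.mpr hre
        have hc := pvConsume m (L-1) rem [] out (by omega)
          (fun k hk => by
            simp only [List.nil_append]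
            exact hmb (k+1) (by omega) (by omega))
        have hdrop : rem.drop (L-1) = rem[L-1]'(by omega) :: rem.drop L := by
          rw [List.drop_eq_getElem_cons (by omega)]
          congr 2
          omega
        have htake : (rem.take (L-1)) ++ [rem[L-1]'(by omega)] = rem.take L := by
          conv_rhs => rw [show L = L-1+1 from by omega]
          rw [List.take_add_one]
          simp [List.getElem?_eq_getElem (show L-1 < rem.length by omega)]
        have hstep : pvStepA m (out, [] ++ List.take (L-1) rem) (rem[L-1]'(by omega))
            = (out ++ [sym], []) := by
          simp only [pvStepA, List.nil_append]
          rw [htake, hhit]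
        rw [hc, hdrop, List.foldl_cons, hstep]
        exact ih (rem.drop L) (out ++ [sym]) (by simp only [List.length_drop]; omega)

-- every key of dict(zip(codigos, alfabeto_fuente)) is one of the codes
theorem pvKey_mem_codigos (c a : List String) (k : String)
    (h : k ∈ (PySem.Dict.ofList (c.zip a)).keys) : k ∈ c := by
  unfold PySem.Dict.ofList PySem.Dict.update at h
  rw [PySem.Dict.keys_foldl_insert_key (key := Prod.fst) (f := fun d x => x.2)] at h
  rw [PySem.Set.mem_update] at h
  rcases h with h | h
  · simp [PySem.Dict.keys_empty] at h
  · obtain ⟨p, hp, rfl⟩ := List.mem_map.mp h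
    exact (List.of_mem_zip hp).1

-- ===== VERDICT (by name: the statement is the Claim_ definition above) =====
theorem decodificarMensaje_spec : Claim_equal_decodificarMensaje := by
  intro a c s _
  unfold Spec_decodificarMensaje decodificarMensaje decodificarMensaje_alt
  refine pvMainLoop (PySem.Dict.ofList (c.zip a))
    (PySem.List.maxD (c.map (fun t => t.toList.length)) (fun x => x) 0) ?_ s.toList []
  intro k v hget
  have hk : k ∈ (PySem.Dict.ofList (c.zip a)).keys := by
    by_contra hnk
    rw [(PySem.Dict.get?_eq_none_iff_not_mem_keys _ _).mpr hnk] at hget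
    simp at hget
  exact pvMem_le_maxD _ _ (List.mem_map_of_mem (pvKey_mem_codigos c a k hk))
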